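-- pv_equiv track=rewrite | github.com/Noah-Park8933/lifescience_gichulbyeonhyung | problem_bank/gene_detx_bank.py | possible_ploidy_from_sums
-- ===== SOURCE A (Python) =====
-- from typing import Dict, Any, List, Tuple, Iterable, Optional
--
-- def possible_ploidy_from_sums(row_cell: Dict[str, Any], sum_cols: List[Tuple[str, str, str]]) -> Tuple[bool, bool]:
--     could_n, could_2n = True, True
--     for col, _, _ in sum_cols:
--         v = row_cell[col]
--         if not (0 <= v <= 2):
--             could_n = False
--         if not (0 <= v <= 4):
--             could_2n = False
--     return could_n, could_2n
-- ===== SOURCE B (Python) =====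
-- def possible_ploidy_from_sums(row_cell, sum_cols):
--     vs = [row_cell[col] for col, _, _ in sum_cols]
--     lo = min(vs, default=0)
--     hi = max(vs, default=0)
--     return (lo >= 0 and hi <= 2, lo >= 0 and hi <= 4)
-- ===== Notes on version B (the rewrite author's own statement) =====
-- stated objective: alternative
-- what changed: A maintains two boolean flags with per-element range tests inside the loop; B instead gathers the looked-up values and reduces them to min and max (default 0 on empty input), answering both ploidy questions with two constant-time range comparisons.
import Mathlib
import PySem

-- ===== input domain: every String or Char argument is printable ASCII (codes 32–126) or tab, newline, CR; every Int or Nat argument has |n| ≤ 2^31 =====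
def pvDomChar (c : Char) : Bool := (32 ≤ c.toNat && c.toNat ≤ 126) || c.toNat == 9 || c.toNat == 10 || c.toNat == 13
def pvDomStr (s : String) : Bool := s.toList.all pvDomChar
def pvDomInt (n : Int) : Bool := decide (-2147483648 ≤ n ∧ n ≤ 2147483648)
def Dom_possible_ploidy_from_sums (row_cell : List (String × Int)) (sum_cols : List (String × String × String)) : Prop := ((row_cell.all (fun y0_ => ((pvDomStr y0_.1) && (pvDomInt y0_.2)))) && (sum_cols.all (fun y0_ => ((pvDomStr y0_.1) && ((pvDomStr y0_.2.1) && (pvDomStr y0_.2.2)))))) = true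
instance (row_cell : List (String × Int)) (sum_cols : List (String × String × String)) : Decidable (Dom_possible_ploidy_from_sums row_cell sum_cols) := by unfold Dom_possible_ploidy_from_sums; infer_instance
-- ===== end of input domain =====

-- ===== PORT A =====
-- B replaces A's per-element flag updates by a min/max reduction followed by two range tests
-- (objective: alternative decomposition, same cost).
-- row_cell[col]: first-match association-list lookup; Pre_ guarantees the key is present
-- (Python raises KeyError otherwise), so the .getD 0 default is never reached inside Pre_.
def possible_ploidy_from_sums (row_cell : List (String × Int)) (sum_cols : List (String × String × String)) : Bool × Bool :=
  sum_cols.foldl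
    (fun (st : Bool × Bool) (t : String × String × String) =>
      let v : Int := (List.lookup t.1 row_cell).getD 0
      (if !(decide (0 ≤ v) && decide (v ≤ 2)) then false else st.1,
       if !(decide (0 ≤ v) && decide (v ≤ 4)) then false else st.2))
    (true, true)

-- ===== PORT B =====
def possible_ploidy_from_sums_alt (row_cell : List (String × Int)) (sum_cols : List (String × String × String)) : Bool × Bool :=
  let vs : List Int := sum_cols.map (fun t => (List.lookup t.1 row_cell).getD 0)
  let lo : Int := (PySem.List.min? vs (fun x => x)).getD 0   -- min(vs, default=0)
  let hi : Int := (PySem.List.max? vs (fun x => x)).getD 0   -- max(vs, default=0)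
  (decide (0 ≤ lo) && decide (hi ≤ 2), decide (0 ≤ lo) && decide (hi ≤ 4))

-- ===== PRECONDITION & SPEC =====
-- Pre_ excludes exactly the inputs on which A raises KeyError: some column named in
-- sum_cols is missing from row_cell.
def Pre_possible_ploidy_from_sums (row_cell : List (String × Int)) (sum_cols : List (String × String × String)) : Prop :=
  ∀ t ∈ sum_cols, t.1 ∈ row_cell.map Prod.fst
instance (row_cell : List (String × Int)) (sum_cols : List (String × String × String)) : Decidable (Pre_possible_ploidy_from_sums row_cell sum_cols) := by unfold Pre_possible_ploidy_from_sums; infer_instance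
def pvWitness_possible_ploidy_from_sums : (List (String × Int)) × (List (String × String × String)) :=
  ([("a", 1), ("b", 3)], [("a", "n", "x"), ("b", "n", "y")])
def Spec_possible_ploidy_from_sums (row_cell : List (String × Int)) (sum_cols : List (String × String × String)) (out : Bool × Bool) : Prop := out = possible_ploidy_from_sums_alt row_cell sum_cols
instance (row_cell : List (String × Int)) (sum_cols : List (String × String × String)) (out : Bool × Bool) : Decidable (Spec_possible_ploidy_from_sums row_cell sum_cols out) := by unfold Spec_possible_ploidy_from_sums; infer_instance

-- ===== CLAIM (what is proved, stated in full; the proofs are below) =====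
def Claim_equal_possible_ploidy_from_sums : Prop := ∀ (row_cell : List (String × Int)) (sum_cols : List (String × String × String)), Dom_possible_ploidy_from_sums row_cell sum_cols → Pre_possible_ploidy_from_sums row_cell sum_cols → Spec_possible_ploidy_from_sums row_cell sum_cols (possible_ploidy_from_sums row_cell sum_cols)

-- ===== LEMMAS AND PROOFS =====

theorem ploidy_if_and (c b : Bool) : (if !c then false else b) = (b && c) := by
  cases c <;> cases b <;> rfl

theorem ploidy_fold_cols (rc : List (String × Int)) (sc : List (String × String × String)) (init : Bool × Bool) :
    sc.foldl
      (fun (st : Bool × Bool) (t : String × String × String) =>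
        (if !(decide (0 ≤ (List.lookup t.1 rc).getD 0) && decide ((List.lookup t.1 rc).getD 0 ≤ 2)) then false else st.1,
         if !(decide (0 ≤ (List.lookup t.1 rc).getD 0) && decide ((List.lookup t.1 rc).getD 0 ≤ 4)) then false else st.2))
      init
    = (sc.map (fun t => (List.lookup t.1 rc).getD 0)).foldl
        (fun (st : Bool × Bool) (v : Int) =>
          (if !(decide (0 ≤ v) && decide (v ≤ 2)) then false else st.1,
           if !(decide (0 ≤ v) && decide (v ≤ 4)) then false else st.2))
        init := by
  induction sc generalizing init with
  | nil => rfl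
  | cons x t ih => simp only [List.foldl_cons, List.map_cons, ih]

-- A's loop, seen over the list of looked-up values: it computes "all in [0,2]" and "all in [0,4]".
theorem ploidy_fold_char (vs : List Int) (b1 b2 : Bool) :
    vs.foldl
      (fun (st : Bool × Bool) (v : Int) =>
        (if !(decide (0 ≤ v) && decide (v ≤ 2)) then false else st.1,
         if !(decide (0 ≤ v) && decide (v ≤ 4)) then false else st.2))
      (b1, b2)
    = (b1 && vs.all (fun v => decide (0 ≤ v) && decide (v ≤ 2)),
       b2 && vs.all (fun v => decide (0 ≤ v) && decide (v ≤ 4))) := by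
  induction vs generalizing b1 b2 with
  | nil => simp
  | cons x t ih =>
    rw [List.foldl_cons, ih]
    simp only [List.all_cons, ploidy_if_and, Bool.and_assoc]

theorem ploidy_min_iff (t : List Int) (x : Int) :
    0 ≤ List.foldl min x t ↔ 0 ≤ x ∧ ∀ v ∈ t, 0 ≤ v := by
  induction t generalizing x with
  | nil => simp
  | cons y s ih =>
    rw [List.foldl_cons, ih (min x y), le_min_iff]
    simp only [List.mem_cons]
    constructor
    · rintro ⟨⟨hx, hy⟩, hs⟩
      exact ⟨hx, fun v hv => hv.elim (fun e => e ▸ hy) (hs v)⟩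
    · rintro ⟨hx, h⟩
      exact ⟨⟨hx, h y (Or.inl rfl)⟩, fun v hv => h v (Or.inr hv)⟩

theorem ploidy_max_iff (t : List Int) (x c : Int) :
    List.foldl max x t ≤ c ↔ x ≤ c ∧ ∀ v ∈ t, v ≤ c := by
  induction t generalizing x with
  | nil => simp
  | cons y s ih =>
    rw [List.foldl_cons, ih (max x y), max_le_iff]
    simp only [List.mem_cons]
    constructor
    · rintro ⟨⟨hx, hy⟩, hs⟩
      exact ⟨hx, fun v hv => hv.elim (fun e => e ▸ hy) (hs v)⟩
    · rintro ⟨hx, h⟩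
      exact ⟨⟨hx, h y (Or.inl rfl)⟩, fun v hv => h v (Or.inr hv)⟩

-- "every element is in [0,c]" equals "min ≥ 0 and max ≤ c" (defaults 0 on the empty list).
theorem all_range_iff_min_max (vs : List Int) (c : Int) (hc : 0 ≤ c) :
    vs.all (fun v => decide (0 ≤ v) && decide (v ≤ c))
    = (decide (0 ≤ (PySem.List.min? vs (fun x => x)).getD 0) &&
       decide ((PySem.List.max? vs (fun x => x)).getD 0 ≤ c)) := by
  cases vs with
  | nil => simp [PySem.List.min?, PySem.List.max?, hc]
  | cons x t =>
    rw [PySem.List.min?_id_cons, PySem.List.max?_id_cons]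
    simp only [Option.getD_some]
    rw [Bool.eq_iff_iff]
    simp only [Bool.and_eq_true, List.all_eq_true, decide_eq_true_eq]
    constructor
    · intro h
      refine ⟨(ploidy_min_iff t x).2 ⟨(h x (List.mem_cons_self)).1,
                fun v hv => (h v (List.mem_cons_of_mem x hv)).1⟩,
              (ploidy_max_iff t x c).2 ⟨(h x (List.mem_cons_self)).2,
                fun v hv => (h v (List.mem_cons_of_mem x hv)).2⟩⟩
    · rintro ⟨h1, h2⟩ v hv
      rcases List.mem_cons.mp hv with rfl | hv
      · exact ⟨((ploidy_min_iff t v).1 h1).1, ((ploidy_max_iff t v c).1 h2).1⟩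
      · exact ⟨((ploidy_min_iff t x).1 h1).2 v hv, ((ploidy_max_iff t x c).1 h2).2 v hv⟩

-- ===== VERDICT (by name: the statement is the Claim_ definition above) =====
theorem possible_ploidy_from_sums_spec : Claim_equal_possible_ploidy_from_sums := by
  intro row_cell sum_cols _ _
  unfold Spec_possible_ploidy_from_sums
  simp only [possible_ploidy_from_sums, possible_ploidy_from_sums_alt]
  rw [ploidy_fold_cols, ploidy_fold_char]
  simp only [Bool.true_and]
  rw [all_range_iff_min_max _ 2 (by norm_num), all_range_iff_min_max _ 4 (by norm_num)]
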